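-- pv_equiv track=rewrite | github.com/klknet/geeks4geeks | datastructure/array/search.py | max_sum_arr
-- ===== SOURCE A (Python) =====
-- def max_sum_arr(arrA, arrB):
--     """
--     Find the contiguous subarray sum which not include in another array.
--     :param arrA:
--     :param arrB:
--     :return:
--     """
--     max_so_far = 0
--     max_ending_here = 0
--     for i in range(len(arrA)):
--         if in_arr(arrB, arrA[i]):
--             max_ending_here = 0
--             continue
--         max_ending_here += arrA[i]
--         if max_ending_here > max_so_far:
--             max_so_far = max_ending_here
--         if max_ending_here < 0:
--             max_ending_here = 0
--     return max_so_far
--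
-- def in_arr(arr, x):
--     for i in arr:
--         if x == i:
--             return True
--     return False
-- ===== SOURCE B (Python) =====
-- def max_sum_arr(arrA, arrB):
--     """Two-phase version: split arrA into maximal contiguous segments free of
--     elements of arrB, then run Kadane (floored at 0) on each segment and
--     return the best."""
--     forbidden = set(arrB)
--     segments = []
--     i, n = 0, len(arrA)
--     while i < n:
--         if arrA[i] in forbidden:
--             i += 1
--             continue
--         j = i
--         while j < n and arrA[j] not in forbidden:
--             j += 1
--         segments.append(arrA[i:j])
--         i = j
--     best = 0
--     for seg in segments:
--         b = _kadane(seg)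
--         if b > best:
--             best = b
--     return best
--
-- def _kadane(seg):
--     best = 0
--     cur = 0
--     for x in seg:
--         cur += x
--         if cur > best:
--             best = cur
--         if cur < 0:
--             cur = 0
--     return best
-- ===== Notes on version B (the rewrite author's own statement) =====
-- stated objective: faster
-- what changed: A interleaves Kadane with a linear in_arr scan of arrB for every element in one loop; B builds a set from arrB once, materializes the maximal contiguous segments of arrA free of arrB-elements, then runs standard zero-floored Kadane on each segment and returns the overall maximum.
import Mathlib
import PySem

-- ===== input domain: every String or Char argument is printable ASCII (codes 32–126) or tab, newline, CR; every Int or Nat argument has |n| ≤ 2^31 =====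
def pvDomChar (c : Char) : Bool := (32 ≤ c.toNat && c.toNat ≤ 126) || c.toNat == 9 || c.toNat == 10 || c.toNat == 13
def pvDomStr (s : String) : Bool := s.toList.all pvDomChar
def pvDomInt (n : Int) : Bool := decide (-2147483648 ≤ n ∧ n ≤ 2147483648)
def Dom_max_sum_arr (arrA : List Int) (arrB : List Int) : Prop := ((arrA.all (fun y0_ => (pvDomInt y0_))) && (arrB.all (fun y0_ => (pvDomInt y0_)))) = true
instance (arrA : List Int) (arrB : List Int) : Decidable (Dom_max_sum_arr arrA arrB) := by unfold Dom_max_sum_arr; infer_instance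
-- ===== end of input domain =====

-- B replaces A's single interleaved loop (membership test by linear scan inside Kadane)
-- by an explicit segmentation pass (set built once from arrB) followed by zero-floored
-- Kadane run on each segment; alternative decomposition, same return value.

-- ===== PORT A =====
-- helper in_arr: linear scan with early return
def in_arr : List Int → Int → Bool
  | [], _ => false
  | i :: rest, x => if x == i then true else in_arr rest x

-- A's loop body over (max_so_far, max_ending_here)
def pvStepA (arrB : List Int) (st : Int × Int) (x : Int) : Int × Int :=
  if in_arr arrB x then (st.1, 0)
  else
    let meh := st.2 + x
    let msf := if meh > st.1 then meh else st.1
    (msf, if meh < 0 then 0 else meh)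

def max_sum_arr (arrA : List Int) (arrB : List Int) : Int :=
  (arrA.foldl (pvStepA arrB) (0, 0)).1

-- ===== PORT B =====
-- _kadane's loop body over (best, cur)
def pvStepK (st : Int × Int) (x : Int) : Int × Int :=
  let cur := st.2 + x
  let best := if cur > st.1 then cur else st.1
  (best, if cur < 0 then 0 else cur)

def pvKadane (seg : List Int) : Int :=
  (seg.foldl pvStepK (0, 0)).1

-- the segmentation loop of Source B: skip forbidden, scan a maximal clean run, repeat
def pvSegs (f : Int → Bool) : List Int → List (List Int)
  | [] => []
  | x :: xs =>
    if f x then pvSegs f xs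
    else (x :: xs.takeWhile (fun y => !(f y))) :: pvSegs f (xs.dropWhile (fun y => !(f y)))
termination_by l => l.length
decreasing_by
  · simp
  · exact Nat.lt_succ_of_le (List.length_dropWhile_le _ _)

-- the set built once from arrB (Source B's `forbidden = set(arrB)`)
def pvForbidden (arrB : List Int) : PySem.Set Int := PySem.Set.ofList arrB

-- the final loop body of Source B: best = max(best, kadane(seg)) via an if
def pvBestStep (best : Int) (seg : List Int) : Int :=
  let b := pvKadane seg
  if b > best then b else best

def max_sum_arr_alt (arrA : List Int) (arrB : List Int) : Int :=
  (pvSegs (fun x => (pvForbidden arrB).contains x) arrA).foldl pvBestStep 0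

-- ===== PRECONDITION & SPEC =====
def Spec_max_sum_arr (arrA : List Int) (arrB : List Int) (out : Int) : Prop := out = max_sum_arr_alt arrA arrB
instance (arrA : List Int) (arrB : List Int) (out : Int) : Decidable (Spec_max_sum_arr arrA arrB out) := by unfold Spec_max_sum_arr; infer_instance

-- ===== CLAIM (what is proved, stated in full; the proofs are below) =====
def Claim_equal_max_sum_arr : Prop := ∀ (arrA : List Int) (arrB : List Int), Dom_max_sum_arr arrA arrB → Spec_max_sum_arr arrA arrB (max_sum_arr arrA arrB)

-- ===== LEMMAS AND PROOFS =====

-- both membership tests decide x ∈ arrB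
lemma in_arr_eq_mem (arrB : List Int) (x : Int) : in_arr arrB x = decide (x ∈ arrB) := by
  induction arrB with
  | nil => simp [in_arr]
  | cons i rest ih =>
    by_cases h : x = i <;> simp [in_arr, h, ih]

lemma contains_eq_in_arr (arrB : List Int) (x : Int) :
    (pvForbidden arrB).contains x = in_arr arrB x := by
  rw [in_arr_eq_mem]
  simp [pvForbidden, PySem.Set.contains]

lemma pvBestStep_eq_max (best : Int) (seg : List Int) :
    pvBestStep best seg = max best (pvKadane seg) := by
  simp only [pvBestStep, Int.max_def]
  split_ifs <;> omega

-- Kadane's best only grows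
lemma kfold_mono (s : List Int) (b c : Int) : b ≤ (s.foldl pvStepK (b, c)).1 := by
  induction s generalizing b c with
  | nil => simp
  | cons x t ih =>
    simp only [List.foldl_cons, pvStepK]
    refine le_trans ?_ (ih _ _)
    split <;> omega

-- the best component of a Kadane fold splits off its seed
lemma kfold_seed (s : List Int) (b c : Int) (hb : 0 ≤ b) :
    s.foldl pvStepK (b, c) = (max b (s.foldl pvStepK (0, c)).1, (s.foldl pvStepK (0, c)).2) := by
  induction s generalizing b c with
  | nil => simp; omega
  | cons x t ih =>
    simp only [List.foldl_cons, pvStepK]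
    have h1 := ih (if c + x > b then c + x else b) (if c + x < 0 then 0 else c + x)
      (by split <;> omega)
    have h2 := ih (if c + x > 0 then c + x else 0) (if c + x < 0 then 0 else c + x)
      (by split <;> omega)
    have hnn : (0:Int) ≤ (t.foldl pvStepK (0, if c + x < 0 then 0 else c + x)).1 :=
      kfold_mono _ _ _
    rw [h1, h2]
    simp only [Prod.mk.injEq]
    refine ⟨?_, trivial⟩
    simp only [Int.max_def]
    split_ifs <;> omega

-- on a run with no forbidden element, A's step agrees with Kadane's, accumulating the max
lemma afold_clean (arrB : List Int) (s : List Int)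
    (hs : ∀ y ∈ s, in_arr arrB y = false) (msf cur : Int) (hm : 0 ≤ msf) :
    s.foldl (pvStepA arrB) (msf, cur)
      = (max msf (s.foldl pvStepK (0, cur)).1, (s.foldl pvStepK (0, cur)).2) := by
  induction s generalizing msf cur with
  | nil => simp; omega
  | cons x t ih =>
    have hx : in_arr arrB x = false := hs x (by simp)
    simp only [List.foldl_cons, pvStepA, pvStepK, hx, Bool.false_eq_true, if_false]
    have ht : ∀ y ∈ t, in_arr arrB y = false := fun y hy => hs y (by simp [hy])
    rw [ih ht (if cur + x > msf then cur + x else msf)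
         (if cur + x < 0 then 0 else cur + x) (by split <;> omega)]
    rw [kfold_seed t (if cur + x > 0 then cur + x else 0) (if cur + x < 0 then 0 else cur + x)
         (by split <;> omega)]
    have hnn : (0:Int) ≤ (t.foldl pvStepK (0, if cur + x < 0 then 0 else cur + x)).1 :=
      kfold_mono _ _ _
    simp only [Prod.mk.injEq]
    refine ⟨?_, trivial⟩
    simp only [Int.max_def]
    split_ifs <;> omega

lemma dropWhile_head_false {p : Int → Bool} {l : List Int} {y : Int} {t : List Int}
    (h : l.dropWhile p = y :: t) : p y = false := by
  induction l with
  | nil => simp [List.dropWhile] at h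
  | cons a l ih =>
    by_cases ha : p a
    · exact ih (by simpa [List.dropWhile, ha] using h)
    · simp [List.dropWhile, ha] at h
      rcases h with ⟨h1, _⟩
      simpa [h1] using (Bool.not_eq_true _).mp ha

-- main correspondence: A's fold from (msf, 0) equals B's per-segment fold seeded at msf
lemma main_corr (arrB : List Int) :
    ∀ n (l : List Int), l.length ≤ n → ∀ msf : Int, 0 ≤ msf →
      (l.foldl (pvStepA arrB) (msf, 0)).1
        = (pvSegs (fun x => in_arr arrB x) l).foldl pvBestStep msf := by
  intro n
  induction n with
  | zero =>
    intro l hl msf _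
    cases l with
    | nil => simp [pvSegs]
    | cons a l => simp at hl
  | succ n ih =>
    intro l hl msf hm
    cases l with
    | nil => simp [pvSegs]
    | cons x xs =>
      have hxs : xs.length ≤ n := by simp at hl; omega
      by_cases hx : in_arr arrB x
      · -- forbidden head: reset, recurse
        simp only [List.foldl_cons, pvStepA, hx, if_true]
        rw [pvSegs]
        simp only [hx, if_true]
        exact ih xs hxs msf hm
      · -- clean head: split off the maximal run
        have hxf : in_arr arrB x = false := by simpa using hx
        rw [pvSegs]
        simp only [hxf, Bool.false_eq_true, if_false]
        set p : Int → Bool := fun y => !(in_arr arrB y) with hp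
        have hsplit : x :: xs = (x :: xs.takeWhile p) ++ xs.dropWhile p := by
          simp [List.takeWhile_append_dropWhile]
        have hclean : ∀ y ∈ x :: xs.takeWhile p, in_arr arrB y = false := by
          intro y hy
          rcases List.mem_cons.mp hy with h | h
          · simpa [h] using hxf
          · have := List.mem_takeWhile_imp h
            simpa [hp] using this
        rw [show (x :: xs).foldl (pvStepA arrB) (msf, 0)
              = ((x :: xs.takeWhile p) ++ xs.dropWhile p).foldl (pvStepA arrB) (msf, 0) from by
            rw [← hsplit]]
        rw [List.foldl_append]
        rw [afold_clean arrB _ hclean msf 0 hm]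
        have hK : ((x :: xs.takeWhile p).foldl pvStepK (0, 0)).1
            = pvKadane (x :: xs.takeWhile p) := rfl
        rw [hK]
        rw [show List.foldl pvBestStep msf
              ((x :: xs.takeWhile p) :: pvSegs (fun x => in_arr arrB x) (xs.dropWhile p))
            = List.foldl pvBestStep (pvBestStep msf (x :: xs.takeWhile p))
              (pvSegs (fun x => in_arr arrB x) (xs.dropWhile p)) from rfl, pvBestStep_eq_max]
        have hM : (0:Int) ≤ max msf (pvKadane (x :: xs.takeWhile p)) := le_max_of_le_left hm
        cases hd : xs.dropWhile p with
        | nil => simp [pvSegs]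
        | cons y t =>
          have hy : in_arr arrB y = true := by
            have := dropWhile_head_false hd
            simpa [hp] using this
          have hlen : t.length ≤ n := by
            have h1 : (y :: t).length ≤ xs.length := hd ▸ List.length_dropWhile_le _ _
            simp at h1; omega
          simp only [List.foldl_cons, pvStepA, hy, if_true]
          rw [pvSegs]
          simp only [hy, if_true]
          exact ih t hlen (max msf (pvKadane (x :: xs.takeWhile p))) hM

-- ===== VERDICT (by name: the statement is the Claim_ definition above) =====
theorem max_sum_arr_spec : Claim_equal_max_sum_arr := by
  intro arrA arrB _
  unfold Spec_max_sum_arr max_sum_arr max_sum_arr_alt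
  have hf : (fun x => (pvForbidden arrB).contains x) = fun x => in_arr arrB x := by
    funext x; exact contains_eq_in_arr arrB x
  rw [hf]
  exact main_corr arrB arrA.length arrA le_rfl 0 le_rfl
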